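-- pv_equiv track=rewrite | github.com/hamburger231/pp1 | 04-Subroutines/Ex49.py | ricedoll
-- ===== SOURCE A (Python) =====
-- def ricedoll(n):
--     a = 0
--     b = 0
--     c = 0
--     d = 0
--     e = 0
--     f = 0
--     for i in range(len(n)):
--         if n[i] == "1":
--             a += 1
--         elif n[i] == "2":
--             b += 1
--         elif n[i] == "3":
--             c += 1
--         elif n[i] == "4":
--             d += 1
--         elif n[i] == "5":
--             e += 1
--         elif n[i] == "6":
--             f += 1
--     if a > b and a > c and a > d and a > d and a > e and a > f:
--         return 1
--     elif b > a and b >c and b>d and b>e and b>f: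
--         return 2
--     elif c>a and c>b and c>d and c>e and c>f:
--         return 3
--     elif d> a and d>b and d>c and d>e and d>f:
--         return 4
--     elif e>a and e>b and e>c and e>d and e>f:
--         return 5
--     elif f>a and f>b and f>c and f>d and f>e:
--         return 6
-- ===== SOURCE B (Python) =====
-- def ricedoll(n):
--     ds = sorted(c for c in n if "1" <= c <= "6")
--     best_len, best, tie = 0, None, False
--     i = 0
--     while i < len(ds):
--         j = i + 1
--         while j < len(ds) and ds[j] == ds[i]:
--             j += 1
--         run = j - i
--         if run > best_len:
--             best_len, best, tie = run, int(ds[i]), False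
--         elif run == best_len:
--             tie = True
--         i = j
--     return best if not tie else None
-- ===== Notes on version B (the rewrite author's own statement) =====
-- stated objective: alternative
-- what changed: Instead of counting into six counters and comparing them with six chained conditions, B sorts the digits 1-6 occurring in the string and scans the sorted list for its unique longest run of equal characters, returning that digit (None on a tie or when no digit occurs).
import Mathlib
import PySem

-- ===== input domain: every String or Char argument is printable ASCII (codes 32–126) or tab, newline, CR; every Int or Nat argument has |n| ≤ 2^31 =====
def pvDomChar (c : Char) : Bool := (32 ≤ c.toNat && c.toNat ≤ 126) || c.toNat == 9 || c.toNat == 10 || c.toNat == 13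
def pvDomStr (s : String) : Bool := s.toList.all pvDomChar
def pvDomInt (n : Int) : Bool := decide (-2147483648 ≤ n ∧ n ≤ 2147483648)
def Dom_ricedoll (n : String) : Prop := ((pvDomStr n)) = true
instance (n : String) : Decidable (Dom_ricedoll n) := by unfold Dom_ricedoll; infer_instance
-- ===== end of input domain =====

-- B sorts the relevant digits and finds the unique longest run by a run-length scan,
-- instead of A's six counters and six-way comparison chain (objective: alternative).

-- ===== PORT A =====
def ricedoll (n : String) : Option Int :=
  let s := n.toList.foldl (fun (s : Int × Int × Int × Int × Int × Int) ch =>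
    let (a, b, c, d, e, f) := s
    if ch = '1' then (a + 1, b, c, d, e, f)
    else if ch = '2' then (a, b + 1, c, d, e, f)
    else if ch = '3' then (a, b, c + 1, d, e, f)
    else if ch = '4' then (a, b, c, d + 1, e, f)
    else if ch = '5' then (a, b, c, d, e + 1, f)
    else if ch = '6' then (a, b, c, d, e, f + 1)
    else (a, b, c, d, e, f)) (0, 0, 0, 0, 0, 0)
  let (a, b, c, d, e, f) := s
  if a > b ∧ a > c ∧ a > d ∧ a > d ∧ a > e ∧ a > f then some 1
  else if b > a ∧ b > c ∧ b > d ∧ b > e ∧ b > f then some 2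
  else if c > a ∧ c > b ∧ c > d ∧ c > e ∧ c > f then some 3
  else if d > a ∧ d > b ∧ d > c ∧ d > e ∧ d > f then some 4
  else if e > a ∧ e > b ∧ e > c ∧ e > d ∧ e > f then some 5
  else if f > a ∧ f > b ∧ f > c ∧ f > d ∧ f > e then some 6
  else none

-- ===== PORT B =====
-- the outer while loop of Source B: consume one maximal run per step
-- (int(ds[i]) is ported as ds[i].toNat - 48, exact because only '1'..'6' reach ds)
def pvScan : List Char → Int → Option Int → Bool → Int × Option Int × Bool
  | [], bestLen, best, tie => (bestLen, best, tie)
  | c :: rest, bestLen, best, tie =>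
      let run : Int := 1 + (rest.takeWhile (fun x => x == c)).length
      let rest' := rest.dropWhile (fun x => x == c)
      if run > bestLen then pvScan rest' run (some ((c.toNat : Int) - 48)) false
      else if run = bestLen then pvScan rest' bestLen best true
      else pvScan rest' bestLen best tie
  termination_by l => l.length
  decreasing_by
    all_goals
      simp only [List.length_cons]
      exact Nat.lt_succ_of_le (List.length_dropWhile_le _ _)

def ricedoll_alt (n : String) : Option Int :=
  let ds := PySem.List.sorted (n.toList.filter (fun c => decide ('1' ≤ c ∧ c ≤ '6'))) (fun x => x) false
  let r := pvScan ds 0 none false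
  if r.2.2 then none else r.2.1

-- ===== PRECONDITION & SPEC =====
def Spec_ricedoll (n : String) (out : Option Int) : Prop := out = ricedoll_alt n
instance (n : String) (out : Option Int) : Decidable (Spec_ricedoll n out) := by unfold Spec_ricedoll; infer_instance

-- ===== CLAIM (what is proved, stated in full; the proofs are below) =====
def Claim_equal_ricedoll : Prop := ∀ (n : String), Dom_ricedoll n → Spec_ricedoll n (ricedoll n)

-- ===== LEMMAS AND PROOFS =====

-- the canonical sorted digit list: one block per digit
def pvBlocks (a b c d e f : Nat) : List Char :=
  List.replicate a '1' ++ List.replicate b '2' ++ List.replicate c '3' ++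
  List.replicate d '4' ++ List.replicate e '5' ++ List.replicate f '6'

-- A's fold computes the six character counts
theorem pv_foldA (l : List Char) (a b c d e f : Int) :
    l.foldl (fun (s : Int × Int × Int × Int × Int × Int) ch =>
      let (a, b, c, d, e, f) := s
      if ch = '1' then (a + 1, b, c, d, e, f)
      else if ch = '2' then (a, b + 1, c, d, e, f)
      else if ch = '3' then (a, b, c + 1, d, e, f)
      else if ch = '4' then (a, b, c, d + 1, e, f)
      else if ch = '5' then (a, b, c, d, e + 1, f)
      else if ch = '6' then (a, b, c, d, e, f + 1)
      else (a, b, c, d, e, f)) (a, b, c, d, e, f)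
    = (a + l.count '1', b + l.count '2', c + l.count '3',
       d + l.count '4', e + l.count '5', f + l.count '6') := by
  induction l generalizing a b c d e f with
  | nil => simp
  | cons ch t ih =>
      simp only [List.foldl_cons]
      by_cases h1 : ch = '1'
      · subst h1; simp [ih]; omega
      · by_cases h2 : ch = '2'
        · subst h2; simp [ih]; omega
        · by_cases h3 : ch = '3'
          · subst h3; simp [ih]; omega
          · by_cases h4 : ch = '4'
            · subst h4; simp [ih]; omega
            · by_cases h5 : ch = '5'
              · subst h5; simp [ih]; omega
              · by_cases h6 : ch = '6'
                · subst h6; simp [ih]; omega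
                · simp [h1, h2, h3, h4, h5, h6, ih, List.count_cons]

-- the filtered input is a permutation of the canonical block list
theorem pv_perm (l : List Char) :
    (pvBlocks (l.count '1') (l.count '2') (l.count '3') (l.count '4') (l.count '5') (l.count '6')).Perm
      (l.filter (fun c => decide ('1' ≤ c ∧ c ≤ '6'))) := by
  rw [List.perm_iff_count]
  intro x
  simp only [pvBlocks, List.count_append, List.count_replicate]
  by_cases h1 : x = '1'
  · subst h1; rw [List.count_filter (by decide)]; simp
  by_cases h2 : x = '2'
  · subst h2; rw [List.count_filter (by decide)]; simp
  by_cases h3 : x = '3'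
  · subst h3; rw [List.count_filter (by decide)]; simp
  by_cases h4 : x = '4'
  · subst h4; rw [List.count_filter (by decide)]; simp
  by_cases h5 : x = '5'
  · subst h5; rw [List.count_filter (by decide)]; simp
  by_cases h6 : x = '6'
  · subst h6; rw [List.count_filter (by decide)]; simp
  have hnot : x ∉ l.filter (fun c => decide ('1' ≤ c ∧ c ≤ '6')) := by
    intro hx
    have hp := List.of_mem_filter hx
    have hpp : '1' ≤ x ∧ x ≤ '6' := of_decide_eq_true hp
    have hl' : 49 ≤ x.toNat := Char.le_def.mp hpp.1
    have hu' : x.toNat ≤ 54 := Char.le_def.mp hpp.2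
    have hne : ∀ c : Char, x.toNat = c.toNat → x = c := fun c h =>
      Char.ext (UInt32.toNat_inj.mp h)
    interval_cases h : x.toNat
    · exact h1 (hne _ (by decide))
    · exact h2 (hne _ (by decide))
    · exact h3 (hne _ (by decide))
    · exact h4 (hne _ (by decide))
    · exact h5 (hne _ (by decide))
    · exact h6 (hne _ (by decide))
  have g1 : ¬ ('1' : Char) = x := fun h => h1 h.symm
  have g2 : ¬ ('2' : Char) = x := fun h => h2 h.symm
  have g3 : ¬ ('3' : Char) = x := fun h => h3 h.symm
  have g4 : ¬ ('4' : Char) = x := fun h => h4 h.symm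
  have g5 : ¬ ('5' : Char) = x := fun h => h5 h.symm
  have g6 : ¬ ('6' : Char) = x := fun h => h6 h.symm
  rw [List.count_eq_zero.mpr hnot]
  simp [g1, g2, g3, g4, g5, g6]

-- the canonical block list is weakly increasing
theorem pv_pairwise (a b c d e f : Nat) :
    (pvBlocks a b c d e f).Pairwise (· ≤ ·) := by
  simp [pvBlocks, List.pairwise_append, List.pairwise_replicate, List.mem_append,
    List.mem_replicate]
  refine ⟨⟨⟨fun _ y hy => ?_, fun _ y hy => ?_⟩, fun _ y hy => ?_⟩, fun _ y hy => ?_⟩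
  · rcases hy with ⟨_, rfl⟩ | ⟨_, rfl⟩ <;> decide
  · rcases hy with ⟨_, rfl⟩ | ⟨_, rfl⟩ | ⟨_, rfl⟩ <;> decide
  · rcases hy with ⟨_, rfl⟩ | ⟨_, rfl⟩ | ⟨_, rfl⟩ | ⟨_, rfl⟩ <;> decide
  · rcases hy with ⟨_, rfl⟩ | ⟨_, rfl⟩ | ⟨_, rfl⟩ | ⟨_, rfl⟩ | ⟨_, rfl⟩ <;> decide

-- scanning one maximal run
theorem pv_scan_block (k : Nat) (c : Char) (rest : List Char)
    (h : ∀ x ∈ rest, x ≠ c) (bestLen : Int) (best : Option Int) (tie : Bool) :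
    pvScan (List.replicate (k+1) c ++ rest) bestLen best tie
    = (if ((k : Int) + 1) > bestLen then pvScan rest ((k : Int) + 1) (some ((c.toNat : Int) - 48)) false
       else if ((k : Int) + 1) = bestLen then pvScan rest bestLen best true
       else pvScan rest bestLen best tie) := by
  have htw : (List.replicate k c ++ rest).takeWhile (fun x => x == c) = List.replicate k c ∧
      (List.replicate k c ++ rest).dropWhile (fun x => x == c) = rest := by
    induction k with
    | zero =>
        cases rest with
        | nil => simp
        | cons y t =>
            have : ¬ (y == c) = true := by
              simp only [beq_iff_eq]; exact fun hyc => h y (List.mem_cons_self) hyc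
            simp [List.takeWhile_cons, List.dropWhile_cons, this]
    | succ m ih =>
        simp [List.replicate_succ, List.takeWhile_cons, List.dropWhile_cons, ih]
  rw [List.replicate_succ, List.cons_append, pvScan]
  simp only [htw.1, htw.2, List.length_replicate]
  ring_nf

-- one block, allowing the empty block
theorem pv_scan_blockD (k : Nat) (c : Char) (rest : List Char)
    (h : ∀ x ∈ rest, x ≠ c) (bl : Int) (best : Option Int) (tie : Bool) :
    pvScan (List.replicate k c ++ rest) bl best tie
    = if k = 0 then pvScan rest bl best tie
      else if (k : Int) > bl then pvScan rest (k : Int) (some ((c.toNat : Int) - 48)) false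
      else if (k : Int) = bl then pvScan rest bl best true
      else pvScan rest bl best tie := by
  cases k with
  | zero => simp
  | succ m =>
      rw [pv_scan_block m c rest h]
      simp only [Nat.succ_ne_zero, if_false]
      norm_cast

-- abstract view of the scan: a list of (count, digit value) blocks
def pvSteps : List (Nat × Int) → Int × Option Int × Bool → Int × Option Int × Bool
  | [], acc => acc
  | (k, v) :: t, acc =>
      pvSteps t (if k = 0 then acc
                 else if (k : Int) > acc.1 then ((k : Int), some v, false)
                 else if (k : Int) = acc.1 then (acc.1, acc.2.1, true)
                 else acc)

def pvFlat : List (Nat × Char) → List Char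
  | [] => []
  | (k, c) :: t => List.replicate k c ++ pvFlat t

def pvMaxc : List (Nat × Int) → Nat
  | [] => 0
  | (k, _) :: t => max k (pvMaxc t)

def pvFirst : List (Nat × Int) → Nat → Option Int
  | [], _ => none
  | (k, v) :: t, m => if k = m then some v else pvFirst t m

def pvCnt : List (Nat × Int) → Nat → Nat
  | [], _ => 0
  | (k, _) :: t, m => (if k = m then 1 else 0) + pvCnt t m

theorem pv_mem_flat (bs : List (Nat × Char)) (x : Char) (hx : x ∈ pvFlat bs) :
    ∃ p ∈ bs, x = p.2 := by
  induction bs with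
  | nil => simp [pvFlat] at hx
  | cons p t ih =>
      obtain ⟨k, c⟩ := p
      simp only [pvFlat, List.mem_append, List.mem_replicate] at hx
      rcases hx with ⟨_, hxc⟩ | hx
      · exact ⟨(k, c), List.mem_cons_self, hxc⟩
      · obtain ⟨q, hq, rfl⟩ := ih hx
        exact ⟨q, List.mem_cons_of_mem _ hq, rfl⟩

theorem pv_bridge (bs : List (Nat × Char))
    (hp : List.Pairwise (fun p q : Nat × Char => q.2 ≠ p.2) bs)
    (bl : Int) (best : Option Int) (tie : Bool) :
    pvScan (pvFlat bs) bl best tie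
    = pvSteps (bs.map (fun p => (p.1, (p.2.toNat : Int) - 48))) (bl, best, tie) := by
  induction bs generalizing bl best tie with
  | nil => simp [pvFlat, pvSteps, pvScan]
  | cons p t ih =>
      obtain ⟨k, c⟩ := p
      rw [List.pairwise_cons] at hp
      have hne : ∀ x ∈ pvFlat t, x ≠ c := by
        intro x hx
        obtain ⟨q, hq, rfl⟩ := pv_mem_flat t x hx
        exact hp.1 q hq
      show pvScan (List.replicate k c ++ pvFlat t) bl best tie = _
      rw [pv_scan_blockD k c _ hne]
      simp only [List.map_cons, pvSteps]
      split_ifs <;> simp_all [ih hp.2]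

theorem pv_cnt_pos (t : List (Nat × Int)) (k : Nat) (h0 : 0 < k) (hle : pvMaxc t ≤ k) :
    0 < pvCnt t k ↔ pvMaxc t = k := by
  induction t with
  | nil => simp [pvCnt, pvMaxc]; omega
  | cons p r ih =>
      obtain ⟨m, v⟩ := p
      simp only [pvCnt, pvMaxc] at *
      split_ifs with hm <;> omega

-- the scan state after processing a block list, in closed form
theorem pv_steps_spec (L : List (Nat × Int)) (bl : Nat) (best : Option Int) (tie : Bool) :
    pvSteps L ((bl : Int), best, tie)
    = ( ((max bl (pvMaxc L) : Nat) : Int),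
        if bl < pvMaxc L then pvFirst L (pvMaxc L) else best,
        if bl < pvMaxc L then decide (2 ≤ pvCnt L (pvMaxc L))
        else (tie || decide (0 < bl ∧ pvMaxc L = bl)) ) := by
  induction L generalizing bl best tie with
  | nil =>
      simp only [pvSteps, pvMaxc, Nat.max_zero, Nat.lt_irrefl, if_false]
      simp only [Prod.mk.injEq]
      refine ⟨trivial, rfl, ?_⟩
      have : ¬ (0 < bl ∧ 0 = bl) := by omega
      simp [this]
  | cons p t ih =>
      obtain ⟨k, v⟩ := p
      rw [pvSteps]
      by_cases hk0 : k = 0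
      · subst hk0
        rw [if_pos rfl, ih]
        simp only [pvMaxc, pvFirst, pvCnt, Nat.zero_max]
        by_cases hlt : bl < pvMaxc t
        · have hz : ¬ ((0 : Nat) = pvMaxc t) := by omega
          simp [hlt, hz]
        · simp [hlt]
      · rw [if_neg hk0]
        by_cases hgt : (k : Int) > (bl : Int)
        · rw [if_pos hgt, ih]
          have hkbl : bl < k := by exact_mod_cast hgt
          simp only [pvMaxc, pvFirst, pvCnt]
          by_cases hlt : k < pvMaxc t
          · have h1 : max k (pvMaxc t) = pvMaxc t := by omega
            have h2 : bl < max k (pvMaxc t) := by omega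
            have h3 : ¬ (k = pvMaxc t) := by omega
            simp [h1, h2, h3, hlt, Nat.cast_max]
            omega
          · have h1 : max k (pvMaxc t) = k := by omega
            have h2 : bl < max k (pvMaxc t) := by omega
            have hcp := pv_cnt_pos t k (by omega) (by omega)
            simp [h1, h2, hlt, hkbl, Nat.cast_max]
            refine ⟨by omega, ?_⟩
            by_cases hM : pvMaxc t = k
            · have hc := hcp.mpr hM
              simp [hM, show 0 < k by omega, show 2 ≤ 1 + pvCnt t k by omega]
            · have hc : pvCnt t k = 0 := by
                rcases Nat.eq_zero_or_pos (pvCnt t k) with h | h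
                · exact h
                · exact absurd (hcp.mp h) hM
              simp [hM, hc]
        · rw [if_neg hgt]
          by_cases heq : (k : Int) = (bl : Int)
          · rw [if_pos heq, ih]
            have hkbl : k = bl := by exact_mod_cast heq
            subst hkbl
            simp only [pvMaxc, pvFirst, pvCnt]
            by_cases hlt : k < pvMaxc t
            · have h1 : max k (pvMaxc t) = pvMaxc t := by omega
              have h2 : ¬ (k = pvMaxc t) := by omega
              simp [h1, h2, hlt]
              try omega
            · have h1 : max k (pvMaxc t) = k := by omega
              have h2 : ¬ (k < max k (pvMaxc t)) := by omega
              simp [h1, h2, hlt]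
              try omega
          · rw [if_neg heq, ih]
            have hkbl : k < bl := by omega
            simp only [pvMaxc, pvFirst, pvCnt]
            by_cases hlt : bl < pvMaxc t
            · have h1 : max k (pvMaxc t) = pvMaxc t := by omega
              have h2 : ¬ (k = pvMaxc t) := by omega
              simp [h1, h2, hlt, Nat.cast_max]
            · have h1 : ¬ (bl < max k (pvMaxc t)) := by omega
              have h2 : (max k (pvMaxc t) = bl) ↔ (pvMaxc t = bl) := by omega
              simp [h1, h2, hlt]
              try omega

-- arithmetic core: the strict-max chain equals the unique-max decision
set_option maxHeartbeats 3200000 in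
theorem pv_final (a b c d e f : ℕ) :
    (if (a:Int) > b ∧ (a:Int) > c ∧ (a:Int) > d ∧ (a:Int) > d ∧ (a:Int) > e ∧ (a:Int) > f then some (1:Int)
     else if (b:Int) > a ∧ (b:Int) > c ∧ (b:Int) > d ∧ (b:Int) > e ∧ (b:Int) > f then some 2
     else if (c:Int) > a ∧ (c:Int) > b ∧ (c:Int) > d ∧ (c:Int) > e ∧ (c:Int) > f then some 3
     else if (d:Int) > a ∧ (d:Int) > b ∧ (d:Int) > c ∧ (d:Int) > e ∧ (d:Int) > f then some 4
     else if (e:Int) > a ∧ (e:Int) > b ∧ (e:Int) > c ∧ (e:Int) > d ∧ (e:Int) > f then some 5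
     else if (f:Int) > a ∧ (f:Int) > b ∧ (f:Int) > c ∧ (f:Int) > d ∧ (f:Int) > e then some 6
     else none)
    = (if (if 0 < max a (max b (max c (max d (max e f)))) then
            decide (2 ≤
              (if a = max a (max b (max c (max d (max e f)))) then 1 else 0) +
                ((if b = max a (max b (max c (max d (max e f)))) then 1 else 0) +
                  ((if c = max a (max b (max c (max d (max e f)))) then 1 else 0) +
                    ((if d = max a (max b (max c (max d (max e f)))) then 1 else 0) +
                      ((if e = max a (max b (max c (max d (max e f)))) then 1 else 0) +
                        ((if f = max a (max b (max c (max d (max e f)))) then 1 else 0) + 0))))))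
          else false) = true then
        none
       else if 0 < max a (max b (max c (max d (max e f)))) then
        if a = max a (max b (max c (max d (max e f)))) then some 1
        else if b = max a (max b (max c (max d (max e f)))) then some 2
        else if c = max a (max b (max c (max d (max e f)))) then some 3
        else if d = max a (max b (max c (max d (max e f)))) then some 4
        else if e = max a (max b (max c (max d (max e f)))) then some 5
        else if f = max a (max b (max c (max d (max e f)))) then some 6
        else none
       else none) := by
  set M := max a (max b (max c (max d (max e f)))) with hM
  have hMa : a ≤ M := by omega
  have hMb : b ≤ M := by omega
  have hMc : c ≤ M := by omega
  have hMd : d ≤ M := by omega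
  have hMe : e ≤ M := by omega
  have hMf : f ≤ M := by omega
  have hAtt : M = a ∨ M = b ∨ M = c ∨ M = d ∨ M = e ∨ M = f := by omega
  clear_value M
  clear hM
  set C := (if a = M then 1 else 0) + ((if b = M then 1 else 0) + ((if c = M then 1 else 0) +
      ((if d = M then 1 else 0) + ((if e = M then 1 else 0) + ((if f = M then 1 else 0) + 0))))) with hC
  clear_value C
  by_cases h0 : 0 < M
  · by_cases h2 : 2 ≤ C
    · rw [if_pos (show _ = true by rw [if_pos h0]; exact decide_eq_true h2)]
      have hxa : ¬((a:Int) > b ∧ (a:Int) > c ∧ (a:Int) > d ∧ (a:Int) > d ∧ (a:Int) > e ∧ (a:Int) > f) := by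
        rintro ⟨g1, g2, g3, g4, g5, g6⟩
        have e1 : a = M := by clear hC; rcases hAtt with h'|h'|h'|h'|h'|h' <;> omega
        clear hAtt
        have n1 : ¬ b = M := by clear hC; omega
        have n2 : ¬ c = M := by clear hC; omega
        have n3 : ¬ d = M := by clear hC; omega
        have n4 : ¬ e = M := by clear hC; omega
        have n5 : ¬ f = M := by clear hC; omega
        have : C = 1 := by rw [hC]; simp only [if_pos e1, if_neg n1, if_neg n2, if_neg n3, if_neg n4, if_neg n5]
        omega
      have hxb : ¬((b:Int) > a ∧ (b:Int) > c ∧ (b:Int) > d ∧ (b:Int) > e ∧ (b:Int) > f) := by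
        rintro ⟨g1, g2, g3, g4, g5⟩
        have e1 : b = M := by clear hC; rcases hAtt with h'|h'|h'|h'|h'|h' <;> omega
        clear hAtt
        have n1 : ¬ a = M := by clear hC; omega
        have n2 : ¬ c = M := by clear hC; omega
        have n3 : ¬ d = M := by clear hC; omega
        have n4 : ¬ e = M := by clear hC; omega
        have n5 : ¬ f = M := by clear hC; omega
        have : C = 1 := by rw [hC]; simp only [if_pos e1, if_neg n1, if_neg n2, if_neg n3, if_neg n4, if_neg n5]
        omega
      have hxc : ¬((c:Int) > a ∧ (c:Int) > b ∧ (c:Int) > d ∧ (c:Int) > e ∧ (c:Int) > f) := by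
        rintro ⟨g1, g2, g3, g4, g5⟩
        have e1 : c = M := by clear hC; rcases hAtt with h'|h'|h'|h'|h'|h' <;> omega
        clear hAtt
        have n1 : ¬ a = M := by clear hC; omega
        have n2 : ¬ b = M := by clear hC; omega
        have n3 : ¬ d = M := by clear hC; omega
        have n4 : ¬ e = M := by clear hC; omega
        have n5 : ¬ f = M := by clear hC; omega
        have : C = 1 := by rw [hC]; simp only [if_pos e1, if_neg n1, if_neg n2, if_neg n3, if_neg n4, if_neg n5]
        omega
      have hxd : ¬((d:Int) > a ∧ (d:Int) > b ∧ (d:Int) > c ∧ (d:Int) > e ∧ (d:Int) > f) := by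
        rintro ⟨g1, g2, g3, g4, g5⟩
        have e1 : d = M := by clear hC; rcases hAtt with h'|h'|h'|h'|h'|h' <;> omega
        clear hAtt
        have n1 : ¬ a = M := by clear hC; omega
        have n2 : ¬ b = M := by clear hC; omega
        have n3 : ¬ c = M := by clear hC; omega
        have n4 : ¬ e = M := by clear hC; omega
        have n5 : ¬ f = M := by clear hC; omega
        have : C = 1 := by rw [hC]; simp only [if_pos e1, if_neg n1, if_neg n2, if_neg n3, if_neg n4, if_neg n5]
        omega
      have hxe : ¬((e:Int) > a ∧ (e:Int) > b ∧ (e:Int) > c ∧ (e:Int) > d ∧ (e:Int) > f) := by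
        rintro ⟨g1, g2, g3, g4, g5⟩
        have e1 : e = M := by clear hC; rcases hAtt with h'|h'|h'|h'|h'|h' <;> omega
        clear hAtt
        have n1 : ¬ a = M := by clear hC; omega
        have n2 : ¬ b = M := by clear hC; omega
        have n3 : ¬ c = M := by clear hC; omega
        have n4 : ¬ d = M := by clear hC; omega
        have n5 : ¬ f = M := by clear hC; omega
        have : C = 1 := by rw [hC]; simp only [if_pos e1, if_neg n1, if_neg n2, if_neg n3, if_neg n4, if_neg n5]
        omega
      have hxf : ¬((f:Int) > a ∧ (f:Int) > b ∧ (f:Int) > c ∧ (f:Int) > d ∧ (f:Int) > e) := by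
        rintro ⟨g1, g2, g3, g4, g5⟩
        have e1 : f = M := by clear hC; rcases hAtt with h'|h'|h'|h'|h'|h' <;> omega
        clear hAtt
        have n1 : ¬ a = M := by clear hC; omega
        have n2 : ¬ b = M := by clear hC; omega
        have n3 : ¬ c = M := by clear hC; omega
        have n4 : ¬ d = M := by clear hC; omega
        have n5 : ¬ e = M := by clear hC; omega
        have : C = 1 := by rw [hC]; simp only [if_pos e1, if_neg n1, if_neg n2, if_neg n3, if_neg n4, if_neg n5]
        omega
      simp only [if_neg hxa, if_neg hxb, if_neg hxc, if_neg hxd, if_neg hxe, if_neg hxf]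
    · rw [if_neg (show ¬ _ = true by rw [if_pos h0]; simp [h2]), if_pos h0]
      by_cases ha : a = M
      · 
        have hb : ¬ b = M := fun h => h2 (by rw [hC]; clear hC h2 hAtt; simp only [if_pos ha, if_pos h]; omega)
        have hc : ¬ c = M := fun h => h2 (by rw [hC]; clear hC h2 hAtt; simp only [if_pos ha, if_pos h]; omega)
        have hd : ¬ d = M := fun h => h2 (by rw [hC]; clear hC h2 hAtt; simp only [if_pos ha, if_pos h]; omega)
        have he : ¬ e = M := fun h => h2 (by rw [hC]; clear hC h2 hAtt; simp only [if_pos ha, if_pos h]; omega)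
        have hf : ¬ f = M := fun h => h2 (by rw [hC]; clear hC h2 hAtt; simp only [if_pos ha, if_pos h]; omega)
        rw [if_pos (show (a:Int) > b ∧ (a:Int) > c ∧ (a:Int) > d ∧ (a:Int) > d ∧ (a:Int) > e ∧ (a:Int) > f by exact ⟨by clear hC hAtt; omega, by clear hC hAtt; omega, by clear hC hAtt; omega, by clear hC hAtt; omega, by clear hC hAtt; omega, by clear hC hAtt; omega⟩), if_pos ha]
      · have hna : ¬((a:Int) > b ∧ (a:Int) > c ∧ (a:Int) > d ∧ (a:Int) > d ∧ (a:Int) > e ∧ (a:Int) > f) := by rintro ⟨g1, g2, g3, g4, g5, g6⟩; exact ha (by clear hC; rcases hAtt with h'|h'|h'|h'|h'|h' <;> omega)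
        rw [if_neg hna, if_neg ha]
        by_cases hb : b = M
        · 
          have hc : ¬ c = M := fun h => h2 (by rw [hC]; clear hC h2 hAtt; simp only [if_pos hb, if_pos h, if_neg ha]; omega)
          have hd : ¬ d = M := fun h => h2 (by rw [hC]; clear hC h2 hAtt; simp only [if_pos hb, if_pos h, if_neg ha]; omega)
          have he : ¬ e = M := fun h => h2 (by rw [hC]; clear hC h2 hAtt; simp only [if_pos hb, if_pos h, if_neg ha]; omega)
          have hf : ¬ f = M := fun h => h2 (by rw [hC]; clear hC h2 hAtt; simp only [if_pos hb, if_pos h, if_neg ha]; omega)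
          rw [if_pos (show (b:Int) > a ∧ (b:Int) > c ∧ (b:Int) > d ∧ (b:Int) > e ∧ (b:Int) > f by exact ⟨by clear hC hAtt; omega, by clear hC hAtt; omega, by clear hC hAtt; omega, by clear hC hAtt; omega, by clear hC hAtt; omega⟩), if_pos hb]
        · have hnb : ¬((b:Int) > a ∧ (b:Int) > c ∧ (b:Int) > d ∧ (b:Int) > e ∧ (b:Int) > f) := by rintro ⟨g1, g2, g3, g4, g5⟩; exact hb (by clear hC; rcases hAtt with h'|h'|h'|h'|h'|h' <;> omega)
          rw [if_neg hnb, if_neg hb]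
          by_cases hc : c = M
          · 
            have hd : ¬ d = M := fun h => h2 (by rw [hC]; clear hC h2 hAtt; simp only [if_pos hc, if_pos h, if_neg ha, if_neg hb]; omega)
            have he : ¬ e = M := fun h => h2 (by rw [hC]; clear hC h2 hAtt; simp only [if_pos hc, if_pos h, if_neg ha, if_neg hb]; omega)
            have hf : ¬ f = M := fun h => h2 (by rw [hC]; clear hC h2 hAtt; simp only [if_pos hc, if_pos h, if_neg ha, if_neg hb]; omega)
            rw [if_pos (show (c:Int) > a ∧ (c:Int) > b ∧ (c:Int) > d ∧ (c:Int) > e ∧ (c:Int) > f by exact ⟨by clear hC hAtt; omega, by clear hC hAtt; omega, by clear hC hAtt; omega, by clear hC hAtt; omega, by clear hC hAtt; omega⟩), if_pos hc]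
          · have hnc : ¬((c:Int) > a ∧ (c:Int) > b ∧ (c:Int) > d ∧ (c:Int) > e ∧ (c:Int) > f) := by rintro ⟨g1, g2, g3, g4, g5⟩; exact hc (by clear hC; rcases hAtt with h'|h'|h'|h'|h'|h' <;> omega)
            rw [if_neg hnc, if_neg hc]
            by_cases hd : d = M
            · 
              have he : ¬ e = M := fun h => h2 (by rw [hC]; clear hC h2 hAtt; simp only [if_pos hd, if_pos h, if_neg ha, if_neg hb, if_neg hc]; omega)
              have hf : ¬ f = M := fun h => h2 (by rw [hC]; clear hC h2 hAtt; simp only [if_pos hd, if_pos h, if_neg ha, if_neg hb, if_neg hc]; omega)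
              rw [if_pos (show (d:Int) > a ∧ (d:Int) > b ∧ (d:Int) > c ∧ (d:Int) > e ∧ (d:Int) > f by exact ⟨by clear hC hAtt; omega, by clear hC hAtt; omega, by clear hC hAtt; omega, by clear hC hAtt; omega, by clear hC hAtt; omega⟩), if_pos hd]
            · have hnd : ¬((d:Int) > a ∧ (d:Int) > b ∧ (d:Int) > c ∧ (d:Int) > e ∧ (d:Int) > f) := by rintro ⟨g1, g2, g3, g4, g5⟩; exact hd (by clear hC; rcases hAtt with h'|h'|h'|h'|h'|h' <;> omega)
              rw [if_neg hnd, if_neg hd]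
              by_cases he : e = M
              · 
                have hf : ¬ f = M := fun h => h2 (by rw [hC]; clear hC h2 hAtt; simp only [if_pos he, if_pos h, if_neg ha, if_neg hb, if_neg hc, if_neg hd]; omega)
                rw [if_pos (show (e:Int) > a ∧ (e:Int) > b ∧ (e:Int) > c ∧ (e:Int) > d ∧ (e:Int) > f by exact ⟨by clear hC hAtt; omega, by clear hC hAtt; omega, by clear hC hAtt; omega, by clear hC hAtt; omega, by clear hC hAtt; omega⟩), if_pos he]
              · have hne : ¬((e:Int) > a ∧ (e:Int) > b ∧ (e:Int) > c ∧ (e:Int) > d ∧ (e:Int) > f) := by rintro ⟨g1, g2, g3, g4, g5⟩; exact he (by clear hC; rcases hAtt with h'|h'|h'|h'|h'|h' <;> omega)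
                rw [if_neg hne, if_neg he]
                by_cases hf : f = M
                · 
                  rw [if_pos (show (f:Int) > a ∧ (f:Int) > b ∧ (f:Int) > c ∧ (f:Int) > d ∧ (f:Int) > e by exact ⟨by clear hC hAtt; omega, by clear hC hAtt; omega, by clear hC hAtt; omega, by clear hC hAtt; omega, by clear hC hAtt; omega⟩), if_pos hf]
                · have hnf : ¬((f:Int) > a ∧ (f:Int) > b ∧ (f:Int) > c ∧ (f:Int) > d ∧ (f:Int) > e) := by rintro ⟨g1, g2, g3, g4, g5⟩; exact hf (by clear hC; rcases hAtt with h'|h'|h'|h'|h'|h' <;> omega)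
                  rw [if_neg hnf, if_neg hf]
  · rw [if_neg (show ¬ _ = true by rw [if_neg h0]; simp), if_neg h0]
    have za : a = 0 := by clear hC hAtt; omega
    have zb : b = 0 := by clear hC hAtt; omega
    have zc : c = 0 := by clear hC hAtt; omega
    have zd : d = 0 := by clear hC hAtt; omega
    have ze : e = 0 := by clear hC hAtt; omega
    have zf : f = 0 := by clear hC hAtt; omega
    subst za zb zc zd ze zf
    simp

-- the final decision: A's comparison chain equals B's unique-longest-run rule
set_option maxHeartbeats 2000000 in
theorem pv_decision (a b c d e f : Nat) :
    (if (a:Int) > b ∧ (a:Int) > c ∧ (a:Int) > d ∧ (a:Int) > d ∧ (a:Int) > e ∧ (a:Int) > f then some (1:Int)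
     else if (b:Int) > a ∧ (b:Int) > c ∧ (b:Int) > d ∧ (b:Int) > e ∧ (b:Int) > f then some 2
     else if (c:Int) > a ∧ (c:Int) > b ∧ (c:Int) > d ∧ (c:Int) > e ∧ (c:Int) > f then some 3
     else if (d:Int) > a ∧ (d:Int) > b ∧ (d:Int) > c ∧ (d:Int) > e ∧ (d:Int) > f then some 4
     else if (e:Int) > a ∧ (e:Int) > b ∧ (e:Int) > c ∧ (e:Int) > d ∧ (e:Int) > f then some 5
     else if (f:Int) > a ∧ (f:Int) > b ∧ (f:Int) > c ∧ (f:Int) > d ∧ (f:Int) > e then some 6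
     else none)
    = (let r := pvScan (pvBlocks a b c d e f) 0 none false
       if r.2.2 then none else r.2.1) := by
  have hflat : pvBlocks a b c d e f
      = pvFlat [(a, '1'), (b, '2'), (c, '3'), (d, '4'), (e, '5'), (f, '6')] := by
    simp [pvBlocks, pvFlat]
  have hpair : List.Pairwise (fun p q : Nat × Char => q.2 ≠ p.2)
      [(a, '1'), (b, '2'), (c, '3'), (d, '4'), (e, '5'), (f, '6')] := by
    refine .cons (fun q hq => ?_) (.cons (fun q hq => ?_) (.cons (fun q hq => ?_)
      (.cons (fun q hq => ?_) (.cons (fun q hq => ?_) (.cons (fun q hq => ?_) .nil))))) <;>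
      simp only [List.mem_cons, List.not_mem_nil, or_false] at hq
    · rcases hq with rfl | rfl | rfl | rfl | rfl <;> simp
    · rcases hq with rfl | rfl | rfl | rfl <;> simp
    · rcases hq with rfl | rfl | rfl <;> simp
    · rcases hq with rfl | rfl <;> simp
    · rcases hq with rfl; simp
  rw [hflat, pv_bridge _ hpair]
  rw [show (([(a, '1'), (b, '2'), (c, '3'), (d, '4'), (e, '5'), (f, '6')] : List (Nat × Char)).map
      (fun p => (p.1, (p.2.toNat : Int) - 48)))
    = [(a, (1:Int)), (b, 2), (c, 3), (d, 4), (e, 5), (f, 6)] by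
      norm_num
      refine ⟨?_, ?_, ?_, ?_, ?_, ?_⟩ <;> rfl]
  have hs := pv_steps_spec [(a, (1:Int)), (b, 2), (c, 3), (d, 4), (e, 5), (f, 6)] 0 none false
  push_cast at hs
  rw [hs]
  simp only [pvMaxc, pvFirst, pvCnt, Nat.max_zero, Bool.false_or, false_and, decide_false]
  exact pv_final a b c d e f

-- ===== VERDICT (by name: the statement is the Claim_ definition above) =====
theorem ricedoll_spec : Claim_equal_ricedoll := by
  intro n _
  unfold Spec_ricedoll ricedoll ricedoll_alt
  rw [pv_foldA]
  rw [PySem.List.sorted_id_eq_of_perm_of_pairwise _ _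
    (pv_perm n.toList) (pv_pairwise _ _ _ _ _ _)]
  simp only [zero_add]
  exact pv_decision _ _ _ _ _ _
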